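-- pv_equiv track=rewrite | github.com/anirbans403/robustness_framework | prepare_data/perturbations/character.py | inject_typo
-- ===== SOURCE A (Python) =====
-- from string import ascii_letters
--
-- def inject_typo(word):
--     """
--     Introduces a typo in the first alphabetic character of the given word by replacing
--     it with the next letter in the ASCII sequence. Non-alphabetic characters remain unchanged.
--
--     Parameters:
--     word (str): The word in which to inject a typo.
--
--     Returns:
--     str: The word with a typo introduced at the first alphabetic character.
--     """
--     flag = True
--     ns = ""
--     for c in word:
--         if c in ascii_letters and flag:
--             ns = ns + ascii_letters[(ascii_letters.index(c) + 1) % len(ascii_letters)]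
--             flag = False
--         else:
--             ns += c
--     return ns
-- ===== SOURCE B (Python) =====
-- from string import ascii_letters
--
-- def inject_typo(word):
--     i = next((j for j, c in enumerate(word) if c in ascii_letters), None)
--     if i is None:
--         return word
--     repl = ascii_letters[(ascii_letters.index(word[i]) + 1) % len(ascii_letters)]
--     return word[:i] + repl + word[i + 1:]
-- ===== Notes on version B (the rewrite author's own statement) =====
-- stated objective: simpler
-- what changed: Replaces the char-by-char accumulation with a flag by locate-then-splice: find the index of the first ascii letter, compute its successor, and rebuild with two slices, avoiding A's repeated string concatenation.
import Mathlib
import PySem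

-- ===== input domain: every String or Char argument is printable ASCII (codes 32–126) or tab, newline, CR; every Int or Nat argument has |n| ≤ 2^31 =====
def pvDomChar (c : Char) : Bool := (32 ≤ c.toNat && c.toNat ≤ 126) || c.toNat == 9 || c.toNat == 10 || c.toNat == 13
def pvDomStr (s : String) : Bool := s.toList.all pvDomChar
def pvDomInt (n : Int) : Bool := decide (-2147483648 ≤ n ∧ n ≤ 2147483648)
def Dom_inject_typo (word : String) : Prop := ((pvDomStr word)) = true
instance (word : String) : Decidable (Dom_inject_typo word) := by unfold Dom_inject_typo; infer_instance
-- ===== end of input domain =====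

-- B replaces A's flagged char-by-char accumulation by locate-then-splice (simpler decomposition; same cost).

-- ===== PORT A =====
-- string.ascii_letters, as a character list
def lettersL : List Char := "abcdefghijklmnopqrstuvwxyzABCDEFGHIJKLMNOPQRSTUVWXYZ".toList

-- ascii_letters[(ascii_letters.index(c) + 1) % len(ascii_letters)]; the index is always
-- in range when c ∈ lettersL, so the default is never used
def nextLetter (c : Char) : Char := lettersL.getD ((lettersL.idxOf c + 1) % lettersL.length) ' '

-- A's for-loop: state (flag, accumulated chars of ns)
def injectLoopA : List Char → Bool → List Char → List Char
  | [], _, ns => ns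
  | c :: rest, flag, ns =>
    if lettersL.contains c ∧ flag then injectLoopA rest false (ns ++ [nextLetter c])
    else injectLoopA rest flag (ns ++ [c])

def inject_typo (word : String) : String := String.ofList (injectLoopA word.toList true [])

-- ===== PORT B =====
def inject_typo_alt (word : String) : String :=
  match word.toList.findIdx? (fun c => lettersL.contains c) with
  | none => word
  | some i =>
      String.ofList (word.toList.take i ++ [nextLetter (word.toList.getD i ' ')] ++ word.toList.drop (i + 1))

-- ===== PRECONDITION & SPEC =====
def Spec_inject_typo (word : String) (out : String) : Prop := out = inject_typo_alt word
instance (word : String) (out : String) : Decidable (Spec_inject_typo word out) := by unfold Spec_inject_typo; infer_instance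

-- ===== CLAIM (what is proved, stated in full; the proofs are below) =====
def Claim_equal_inject_typo : Prop := ∀ (word : String), Dom_inject_typo word → Spec_inject_typo word (inject_typo word)

-- ===== LEMMAS AND PROOFS =====

-- once the flag is false, A just copies the rest of the word
theorem injectLoopA_false (l ns : List Char) : injectLoopA l false ns = ns ++ l := by
  induction l generalizing ns with
  | nil => simp [injectLoopA]
  | cons c rest ih => simp [injectLoopA, ih]

-- B's splice, at list level
def coreB (l : List Char) : List Char :=
  match l.findIdx? (fun c => lettersL.contains c) with
  | none => l
  | some i => l.take i ++ [nextLetter (l.getD i ' ')] ++ l.drop (i + 1)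

theorem injectLoopA_true (l ns : List Char) : injectLoopA l true ns = ns ++ coreB l := by
  induction l generalizing ns with
  | nil => simp [injectLoopA, coreB]
  | cons c rest ih =>
    by_cases h : c ∈ lettersL
    · simp [injectLoopA, h, coreB, List.findIdx?_cons, injectLoopA_false]
    · simp only [injectLoopA, List.contains_iff_mem, coreB, List.findIdx?_cons, ih]
      cases hf : List.findIdx? (fun c => decide (c ∈ lettersL)) rest with
      | none => simp [h, hf]
      | some i => simp [h, hf]

-- ===== VERDICT (by name: the statement is the Claim_ definition above) =====
theorem inject_typo_spec : Claim_equal_inject_typo := by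
  intro word _
  unfold Spec_inject_typo inject_typo inject_typo_alt
  rw [injectLoopA_true]
  simp only [List.nil_append]
  cases hf : List.findIdx? (fun c => decide (c ∈ lettersL)) word.toList with
  | none => simp [coreB, hf]
  | some i => simp [coreB, hf]
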